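-- pv_equiv track=rewrite | github.com/MarcinNieckosinski/AdventOfCode2024 | day_8/solution.py | sort_antennas
-- ===== SOURCE A (Python) =====
-- def sort_antennas(antennas):
--     sorted_antennas = []
--     signs = []
--     for antenna in antennas:
--         if antenna[0] not in signs:
--             signs.append(antenna[0])
--     for sign in signs:
--         sing_antennas = []
--         for antenna in antennas:
--             if antenna[0] == sign:
--                 sing_antennas.append(antenna)
--         sorted_antennas.append(sing_antennas)
--     return sorted_antennas
-- ===== SOURCE B (Python) =====
-- def sort_antennas(antennas):
--     groups = {}
--     for antenna in antennas:
--         groups.setdefault(antenna[0], []).append(antenna)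
--     return list(groups.values())
-- ===== Notes on version B (the rewrite author's own statement) =====
-- stated objective: faster
-- what changed: B replaces A's distinct-signs collection plus a full rescan of antennas per sign (O(n*k)) with a single pass that groups antennas into an insertion-ordered dict and returns its values.
import Mathlib
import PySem

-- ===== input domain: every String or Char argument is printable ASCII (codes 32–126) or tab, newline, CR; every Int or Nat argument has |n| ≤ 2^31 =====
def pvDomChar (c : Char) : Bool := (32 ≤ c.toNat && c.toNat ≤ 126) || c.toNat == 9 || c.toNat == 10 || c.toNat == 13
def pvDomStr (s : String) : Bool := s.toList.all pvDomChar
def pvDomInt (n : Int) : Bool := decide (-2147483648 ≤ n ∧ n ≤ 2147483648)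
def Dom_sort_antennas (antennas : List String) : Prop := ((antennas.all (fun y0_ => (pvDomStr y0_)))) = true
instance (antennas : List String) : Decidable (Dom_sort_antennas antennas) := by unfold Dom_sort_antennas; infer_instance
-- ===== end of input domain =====

-- B builds the groups in one pass with an insertion-ordered dict instead of collecting distinct signs and rescanning the whole list per sign.
-- ===== PORT A =====
-- antenna[0]; Pre_ guarantees antennas are nonempty strings, so the default is never used
def pvHd (s : String) : Char := (PySem.Str.pyGet? s 0).getD ' '

def sort_antennas (antennas : List String) : List (List String) :=
  let signs : List Char :=
    antennas.foldl (fun signs a => if signs.contains (pvHd a) then signs else signs ++ [pvHd a]) []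
  signs.foldl (fun acc sign =>
    acc ++ [antennas.foldl (fun l a => if pvHd a == sign then l ++ [a] else l) []]) []

-- ===== PORT B =====
def sort_antennas_alt (antennas : List String) : List (List String) :=
  (antennas.foldl (fun d a => d.modify (pvHd a) [] (fun g => g ++ [a]))
    (PySem.Dict.empty : PySem.Dict Char (List String))).values

-- ===== PRECONDITION & SPEC =====
-- Pre_ excludes lists containing the empty string, on which A (antenna[0]) raises IndexError.
def Pre_sort_antennas (antennas : List String) : Prop := ∀ a ∈ antennas, a ≠ ""
instance (antennas : List String) : Decidable (Pre_sort_antennas antennas) := by unfold Pre_sort_antennas; infer_instance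
def pvWitness_sort_antennas : List String := ["ab", "cd", "a1"]
def Spec_sort_antennas (antennas : List String) (out : List (List String)) : Prop := out = sort_antennas_alt antennas
instance (antennas : List String) (out : List (List String)) : Decidable (Spec_sort_antennas antennas out) := by unfold Spec_sort_antennas; infer_instance

-- ===== CLAIM (what is proved, stated in full; the proofs are below) =====
def Claim_equal_sort_antennas : Prop := ∀ (antennas : List String), Dom_sort_antennas antennas → Pre_sort_antennas antennas → Spec_sort_antennas antennas (sort_antennas antennas)

-- ===== LEMMAS AND PROOFS =====

-- ===== VERDICT (by name: the statement is the Claim_ definition above) =====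
-- A's sign-collecting loop is exactly Set.ofList of the first characters
theorem pv_signs_eq (antennas : List String) :
    antennas.foldl (fun s a => if s.contains (pvHd a) then s else s ++ [pvHd a]) ([] : List Char)
      = PySem.Set.ofList (antennas.map pvHd) := by
  rw [← PySem.Set.update_nil_left, PySem.Set.update_map_eq_foldl_add]
  simp [PySem.Set.add]

-- the value stored by B's grouping loop at key c is the filter A computes for sign c
theorem pv_getD_group (antennas : List String) (c : Char) :
    (antennas.foldl (fun d a => d.modify (pvHd a) [] (fun g => g ++ [a]))
      (PySem.Dict.empty : PySem.Dict Char (List String))).getD c []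
      = antennas.filter (fun a => pvHd a == c) := by
  have h := List.foldl_map (f := fun a => (pvHd a, a))
        (g := fun (d : PySem.Dict Char (List String)) p => d.modify p.1 [] (fun g => g ++ [p.2]))
        (l := antennas) (init := PySem.Dict.empty)
  rw [← h, PySem.Dict.getD_foldl_modify_append]
  simp [List.filter_map, Function.comp_def]

theorem sort_antennas_spec : Claim_equal_sort_antennas := by
  intro antennas _ _
  unfold Spec_sort_antennas sort_antennas sort_antennas_alt
  have hnd : (antennas.foldl (fun d a => d.modify (pvHd a) [] (fun g => g ++ [a]))
      (PySem.Dict.empty : PySem.Dict Char (List String))).keys.Nodup := by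
    exact PySem.Dict.nodup_keys_foldl_modify_key antennas pvHd [] (fun _ a => (· ++ [a])) _
      (by simp [PySem.Dict.keys_empty])
  rw [PySem.Dict.values_eq_map_keys _ hnd []]
  rw [PySem.Dict.keys_foldl_modify_key]
  simp only [PySem.Dict.keys_empty, PySem.Set.update_nil_left]
  rw [pv_signs_eq, PySem.List.foldl_append_singleton_eq_map]
  simp only [PySem.List.foldl_append_if_eq_filter, List.nil_append]
  apply List.map_congr_left
  intro c _
  rw [pv_getD_group]
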